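-- pv_equiv track=rewrite | github.com/ml-tooling/lazydocs | src/lazydocs/generation.py | _is_module_ignored
-- ===== SOURCE A (Python) =====
-- from typing import Any, Callable, Dict, List, Optional
--
-- def _is_module_ignored(module_name: str, ignored_modules: List[str], private_modules: bool = False) -> bool:
--     """Checks if a given module is ignored."""
--     if module_name.split(".")[-1].startswith("_") and module_name[1] != "_" and not private_modules:
--         return True
--
--     for ignored_module in ignored_modules:
--         if module_name == ignored_module:
--             return True
--
--         # Check is module is subpackage of an ignored package
--         if module_name.startswith(ignored_module + "."):
--             return True
--
--     return False
-- ===== SOURCE B (Python) =====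
-- from typing import List
--
--
-- def _is_module_ignored(module_name: str, ignored_modules: List[str], private_modules: bool = False) -> bool:
--     """Checks if a given module is ignored."""
--     if module_name.split(".")[-1].startswith("_") and module_name[1] != "_" and not private_modules:
--         return True
--
--     ignored = set(ignored_modules)
--     if module_name in ignored:
--         return True
--     # walk the dotted ancestor prefixes of module_name: chars before each "."
--     for i, ch in enumerate(module_name):
--         if ch == "." and module_name[:i] in ignored:
--             return True
--     return False
-- ===== Notes on version B (the rewrite author's own statement) =====
-- stated objective: alternative
-- what changed: Instead of scanning every ignored module and testing equality/startswith of module_name against each, B builds a set of ignored_modules once and walks module_name's dotted ancestor prefixes in one pass over the name, testing each prefix for set membership.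
import Mathlib
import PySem

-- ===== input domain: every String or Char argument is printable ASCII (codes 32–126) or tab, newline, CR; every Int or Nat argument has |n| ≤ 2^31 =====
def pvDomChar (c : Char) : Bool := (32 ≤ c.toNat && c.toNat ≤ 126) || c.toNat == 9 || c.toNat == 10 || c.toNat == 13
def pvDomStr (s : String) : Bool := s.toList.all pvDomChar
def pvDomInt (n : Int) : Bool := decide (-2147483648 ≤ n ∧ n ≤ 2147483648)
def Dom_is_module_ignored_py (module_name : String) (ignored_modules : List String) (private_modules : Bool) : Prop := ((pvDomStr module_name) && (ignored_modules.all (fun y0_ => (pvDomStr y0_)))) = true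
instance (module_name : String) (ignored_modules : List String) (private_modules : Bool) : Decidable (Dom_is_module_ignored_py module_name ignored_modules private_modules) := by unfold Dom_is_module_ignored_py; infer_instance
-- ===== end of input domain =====

-- B replaces A's scan over ignored_modules by one pass over module_name's dotted
-- ancestor prefixes, each tested for membership in a set built once from ignored_modules.

-- ===== PORT A =====
-- the first guard, shared verbatim by both Pythons:
--   module_name.split(".")[-1].startswith("_") and module_name[1] != "_" and not private_modules
-- (module_name[1] = PySem.Str.pyGet?; it is `none` exactly where Python raises IndexError — excluded by Pre_)
def pvUnderscoreGuard (module_name : String) (private_modules : Bool) : Bool :=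
  (match PySem.List.pyGet? ((PySem.Str.split? module_name ".").getD []) (-1) with
   | some last => PySem.Str.startswith last "_"
   | none => false)
  && !(PySem.Str.pyGet? module_name 1 == some '_')
  && !private_modules

-- A's for-loop over ignored_modules
def pvAScan (module_name : String) : List String → Bool
  | [] => false
  | m :: rest =>
    if module_name == m then true
    else if PySem.Str.startswith module_name (String.ofList (m.toList ++ ['.'])) then true
    else pvAScan module_name rest

def is_module_ignored_py (module_name : String) (ignored_modules : List String) (private_modules : Bool) : Bool :=
  if pvUnderscoreGuard module_name private_modules then true
  else pvAScan module_name ignored_modules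

-- ===== PORT B =====
-- B's loop: for i, ch in enumerate(module_name): if ch == "." and module_name[:i] in ignored: return True
def pvPrefixScan (full : List Char) (ignored : PySem.Set String) : Nat → List Char → Bool
  | _, [] => false
  | i, ch :: rest =>
    if ch == '.' && PySem.Set.contains ignored (String.ofList (full.take i)) then true
    else pvPrefixScan full ignored (i + 1) rest

def is_module_ignored_py_alt (module_name : String) (ignored_modules : List String) (private_modules : Bool) : Bool :=
  if pvUnderscoreGuard module_name private_modules then true
  else
    let ignored : PySem.Set String := PySem.Set.ofList ignored_modules
    if PySem.Set.contains ignored module_name then true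
    else pvPrefixScan module_name.toList ignored 0 module_name.toList

-- ===== PRECONDITION & SPEC =====
-- Pre_ excludes exactly module_name = "_", the one input where Python A raises
-- IndexError on module_name[1] (B raises there too).
def Pre_is_module_ignored_py (module_name : String) (ignored_modules : List String) (private_modules : Bool) : Prop :=
  module_name ≠ "_"
instance (module_name : String) (ignored_modules : List String) (private_modules : Bool) : Decidable (Pre_is_module_ignored_py module_name ignored_modules private_modules) := by unfold Pre_is_module_ignored_py; infer_instance

def pvWitness_is_module_ignored_py : String × List String × Bool := ("a.b", ["a"], false)

def Spec_is_module_ignored_py (module_name : String) (ignored_modules : List String) (private_modules : Bool) (out : Bool) : Prop := out = is_module_ignored_py_alt module_name ignored_modules private_modules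
instance (module_name : String) (ignored_modules : List String) (private_modules : Bool) (out : Bool) : Decidable (Spec_is_module_ignored_py module_name ignored_modules private_modules out) := by unfold Spec_is_module_ignored_py; infer_instance

-- ===== CLAIM (what is proved, stated in full; the proofs are below) =====
def Claim_equal_is_module_ignored_py : Prop := ∀ (module_name : String) (ignored_modules : List String) (private_modules : Bool), Dom_is_module_ignored_py module_name ignored_modules private_modules → Pre_is_module_ignored_py module_name ignored_modules private_modules → Spec_is_module_ignored_py module_name ignored_modules private_modules (is_module_ignored_py module_name ignored_modules private_modules)

-- ===== LEMMAS AND PROOFS =====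

-- A's loop is an `any` over the ignored list
theorem pvAScan_eq_true_iff (module_name : String) (l : List String) :
    pvAScan module_name l = true ↔
      ∃ m ∈ l, module_name = m ∨ (m.toList ++ ['.']) <+: module_name.toList := by
  induction l with
  | nil => simp [pvAScan]
  | cons m rest ih =>
    have hcons : pvAScan module_name (m :: rest) =
        ((module_name == m)
          || PySem.Str.startswith module_name (String.ofList (m.toList ++ ['.']))
          || pvAScan module_name rest) := by
      simp only [pvAScan]
      split_ifs with h1 h2 <;> simp_all
    rw [hcons]
    simp only [Bool.or_eq_true, ih, beq_iff_eq, PySem.Str.startswith_eq,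
      String.toList_ofList, PySem.Chars.startswith_iff, List.mem_cons]
    constructor
    · rintro ((h | h) | ⟨x, hx, hc⟩)
      · exact ⟨m, Or.inl rfl, Or.inl h⟩
      · exact ⟨m, Or.inl rfl, Or.inr h⟩
      · exact ⟨x, Or.inr hx, hc⟩
    · rintro ⟨x, rfl | hx, hc⟩
      · rcases hc with h | h
        · exact Or.inl (Or.inl h)
        · exact Or.inl (Or.inr h)
      · exact Or.inr ⟨x, hx, hc⟩

-- B's loop: true iff some position j in the tail holds '.' and the prefix of `full`
-- of length i + j is in the set
theorem pvPrefixScan_eq_true_iff (full : List Char) (ignored : PySem.Set String) :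
    ∀ (tail : List Char) (i : Nat), pvPrefixScan full ignored i tail = true ↔
      ∃ j, tail[j]? = some '.' ∧
        PySem.Set.contains ignored (String.ofList (full.take (i + j))) = true := by
  intro tail
  induction tail with
  | nil => simp [pvPrefixScan]
  | cons ch rest ih =>
    intro i
    have hcons : pvPrefixScan full ignored i (ch :: rest) =
        ((ch == '.') && PySem.Set.contains ignored (String.ofList (full.take i))
          || pvPrefixScan full ignored (i + 1) rest) := by
      simp only [pvPrefixScan]
      split_ifs with h <;> simp_all
    rw [hcons]
    simp only [Bool.or_eq_true, Bool.and_eq_true, beq_iff_eq, ih (i + 1)]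
    constructor
    · rintro (⟨rfl, hmem⟩ | ⟨j, hdot, hmem⟩)
      · exact ⟨0, by simp, by simpa using hmem⟩
      · refine ⟨j + 1, by simpa using hdot, ?_⟩
        have : i + (j + 1) = i + 1 + j := by omega
        rw [this]; exact hmem
    · rintro ⟨j, hdot, hmem⟩
      cases j with
      | zero =>
        left
        refine ⟨by simpa using hdot, by simpa using hmem⟩
      | succ j' =>
        right
        refine ⟨j', by simpa using hdot, ?_⟩
        have : i + 1 + j' = i + (j' + 1) := by omega
        rw [this]; exact hmem

theorem pv_contains_ofList (l : List String) (x : String) :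
    PySem.Set.contains (PySem.Set.ofList l) x = true ↔ x ∈ l := by
  simp [PySem.Set.contains, PySem.Set.mem_ofList]

-- the two search strategies agree
theorem pv_scan_eq (module_name : String) (l : List String) :
    pvAScan module_name l =
      (PySem.Set.contains (PySem.Set.ofList l) module_name
        || pvPrefixScan module_name.toList (PySem.Set.ofList l) 0 module_name.toList) := by
  rw [Bool.eq_iff_iff]
  rw [pvAScan_eq_true_iff, Bool.or_eq_true, pv_contains_ofList,
      pvPrefixScan_eq_true_iff]
  constructor
  · rintro ⟨m, hm, rfl | hpre⟩
    · exact Or.inl hm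
    · rcases hpre with ⟨t, ht⟩
      have hcs : module_name.toList = m.toList ++ '.' :: t := by
        rw [← ht, List.append_assoc]; rfl
      refine Or.inr ⟨m.toList.length, ?_, ?_⟩
      · rw [hcs, List.getElem?_append_right (le_refl _)]
        simp
      · have htake : module_name.toList.take (0 + m.toList.length) = m.toList := by
          rw [Nat.zero_add, hcs, List.take_left]
        rw [htake, pv_contains_ofList, String.ofList_toList]
        exact hm
  · rintro (hm | ⟨j, hdot, hmem⟩)
    · exact ⟨module_name, hm, Or.inl rfl⟩
    · rw [pv_contains_ofList] at hmem
      refine ⟨String.ofList (module_name.toList.take (0 + j)), hmem, Or.inr ?_⟩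
      rw [String.toList_ofList, Nat.zero_add]
      have : module_name.toList.take j ++ ['.'] = module_name.toList.take (j + 1) := by
        rw [List.take_add_one, hdot]
        rfl
      rw [this]
      exact List.take_prefix _ _

-- ===== VERDICT (by name: the statement is the Claim_ definition above) =====
theorem is_module_ignored_py_spec : Claim_equal_is_module_ignored_py := by
  intro module_name ignored_modules private_modules _ _
  unfold Spec_is_module_ignored_py is_module_ignored_py is_module_ignored_py_alt
  by_cases h : pvUnderscoreGuard module_name private_modules
  · simp [h]
  · simp only [h, Bool.false_eq_true, if_false]
    rw [pv_scan_eq]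
    rcases PySem.Set.contains (PySem.Set.ofList ignored_modules) module_name
    · simp
    · simp
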